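-- pv_equiv track=rewrite | github.com/LiXuanqi/leetcode-solutions | python3/792.number-of-matching-subsequences.py | find_char_after_index
-- ===== SOURCE A (Python) =====
-- def find_char_after_index(c, last_index, char_position):
--     positions = char_position.get(c, [])
--
--     if not positions:
--         return None
--
--     left = 0
--     right = len(positions) - 1
--
--     while left + 1 < right:
--         mid = (left + right) // 2
--         if positions[mid] <= last_index:
--             left = mid
--         else:
--             right = mid
--
--     if positions[left] > last_index:
--         return positions[left]
--     if positions[right] > last_index:
--         return positions[right]
--
--     return None
-- ===== SOURCE B (Python) =====
-- def find_char_after_index(c, last_index, char_position):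
--     for p in char_position.get(c, []):
--         if p > last_index:
--             return p
--     return None
-- ===== Notes on version B (the rewrite author's own statement) =====
-- stated objective: simpler
-- what changed: Replaces the hand-written binary search (left/right/mid loop plus two final boundary checks) with a single forward linear scan returning the first position strictly greater than last_index.
-- outside the precondition, e.g. on find_char_after_index('a', 1, {'a': [3, 1, 5, 7]}): A returns 5, B returns 3
import Mathlib
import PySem

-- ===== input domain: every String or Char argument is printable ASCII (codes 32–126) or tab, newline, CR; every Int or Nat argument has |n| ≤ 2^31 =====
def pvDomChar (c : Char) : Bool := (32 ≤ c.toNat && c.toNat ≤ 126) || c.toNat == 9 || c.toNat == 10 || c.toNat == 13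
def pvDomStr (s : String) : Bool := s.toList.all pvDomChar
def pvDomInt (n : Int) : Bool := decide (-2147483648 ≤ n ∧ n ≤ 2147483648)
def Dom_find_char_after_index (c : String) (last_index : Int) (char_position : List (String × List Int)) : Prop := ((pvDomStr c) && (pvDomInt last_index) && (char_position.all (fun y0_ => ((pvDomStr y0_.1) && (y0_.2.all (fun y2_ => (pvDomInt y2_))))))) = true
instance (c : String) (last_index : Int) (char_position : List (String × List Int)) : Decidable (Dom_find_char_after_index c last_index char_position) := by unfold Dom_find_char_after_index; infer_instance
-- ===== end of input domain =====

-- B replaces A's hand-written binary search with a single forward linear scan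
-- returning the first position strictly greater than last_index (objective: simpler).


-- ===== PORT A =====
-- the while-loop: while left + 1 < right: mid = (left+right)//2; if positions[mid] <= last_index: left = mid else right = mid.
-- left/right are Nat (they start at 0 and len-1 and stay in range), so positions.getD _ 0 is exactly
-- Python's positions[_] here (the index is always in range) and (left+right)/2 is Python's //2.
def aLoop (positions : List Int) (last_index : Int) (left right : Nat) : Nat × Nat :=
  if left + 1 < right then
    let mid := (left + right) / 2
    if positions.getD mid 0 ≤ last_index then
      aLoop positions last_index mid right
    else
      aLoop positions last_index left mid
  else (left, right)
termination_by right - left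
decreasing_by all_goals omega

def find_char_after_index (c : String) (last_index : Int) (char_position : List (String × List Int)) : Option Int :=
  let positions := (char_position.lookup c).getD []   -- char_position.get(c, []): first match
  if positions = [] then none
  else
    let lr := aLoop positions last_index 0 (positions.length - 1)
    if positions.getD lr.1 0 > last_index then some (positions.getD lr.1 0)
    else if positions.getD lr.2 0 > last_index then some (positions.getD lr.2 0)
    else none

-- ===== PORT B =====
-- the for-loop of Source B: return the first element > last_index, else None
def firstGt (positions : List Int) (last_index : Int) : Option Int :=
  match positions with
  | [] => none
  | p :: ps => if p > last_index then some p else firstGt ps last_index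

def find_char_after_index_alt (c : String) (last_index : Int) (char_position : List (String × List Int)) : Option Int :=
  firstGt ((char_position.lookup c).getD []) last_index

-- ===== PRECONDITION & SPEC =====
-- Pre_ excludes inputs where the positions list looked up for c is not sorted nondecreasing:
-- there A's binary-search answer is an accident of the probe order (binary search assumes sorted data).
def Pre_find_char_after_index (c : String) (last_index : Int) (char_position : List (String × List Int)) : Prop :=
  ((char_position.lookup c).getD []).Pairwise (· ≤ ·)
instance (c : String) (last_index : Int) (char_position : List (String × List Int)) : Decidable (Pre_find_char_after_index c last_index char_position) := by unfold Pre_find_char_after_index; infer_instance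
def pvWitness_find_char_after_index : String × Int × (List (String × List Int)) := ("a", 2, [("a", [1, 3, 3, 5])])
def Spec_find_char_after_index (c : String) (last_index : Int) (char_position : List (String × List Int)) (out : Option Int) : Prop := out = find_char_after_index_alt c last_index char_position
instance (c : String) (last_index : Int) (char_position : List (String × List Int)) (out : Option Int) : Decidable (Spec_find_char_after_index c last_index char_position out) := by unfold Spec_find_char_after_index; infer_instance

-- ===== CLAIM (what is proved, stated in full; the proofs are below) =====
def Claim_equal_find_char_after_index : Prop := ∀ (c : String) (last_index : Int) (char_position : List (String × List Int)), Dom_find_char_after_index c last_index char_position → Pre_find_char_after_index c last_index char_position → Spec_find_char_after_index c last_index char_position (find_char_after_index c last_index char_position)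

-- ===== LEMMAS AND PROOFS =====

-- firstGt finds the element at the first index whose value exceeds last_index
theorem firstGt_eq_some (positions : List Int) (last_index : Int) (j : Nat)
    (hj : j < positions.length)
    (hbefore : ∀ i, i < j → positions.getD i 0 ≤ last_index)
    (hgt : last_index < positions.getD j 0) :
    firstGt positions last_index = some (positions.getD j 0) := by
  induction positions generalizing j with
  | nil => simp at hj
  | cons p ps ih =>
    cases j with
    | zero => simp [firstGt, List.getD] at hgt ⊢; omega
    | succ j =>
      have h0 := hbefore 0 (Nat.succ_pos j)
      simp [List.getD] at h0
      simp [firstGt, if_neg (by omega : ¬ p > last_index)]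
      have := ih j (by simpa using hj)
        (fun i hi => by simpa [List.getD] using hbefore (i+1) (by omega))
        (by simpa [List.getD] using hgt)
      simpa [List.getD] using this

theorem firstGt_eq_none (positions : List Int) (last_index : Int)
    (h : ∀ i, i < positions.length → positions.getD i 0 ≤ last_index) :
    firstGt positions last_index = none := by
  induction positions with
  | nil => rfl
  | cons p ps ih =>
    have h0 := h 0 (Nat.succ_pos _)
    simp [List.getD] at h0
    simp [firstGt, if_neg (by omega : ¬ p > last_index)]
    exact ih (fun i hi => by simpa [List.getD] using h (i+1) (by simpa using Nat.succ_lt_succ hi))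

-- sortedness in index form
theorem sorted_getD_mono (positions : List Int)
    (hs : positions.Pairwise (· ≤ ·)) {i j : Nat}
    (hij : i ≤ j) (hj : j < positions.length) :
    positions.getD i 0 ≤ positions.getD j 0 := by
  rcases Nat.eq_or_lt_of_le hij with rfl | hlt
  · rfl
  · rw [List.getD_eq_getElem _ _ (by omega), List.getD_eq_getElem _ _ hj]
    exact List.pairwise_iff_getElem.mp hs i j (by omega) hj hlt

-- main loop invariant: A's post-loop checks compute firstGt
theorem aLoop_correct (positions : List Int) (last_index : Int)
    (hs : positions.Pairwise (· ≤ ·)) :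
    ∀ (left right : Nat), left ≤ right → right < positions.length →
    (∀ i, i < left → positions.getD i 0 ≤ last_index) →
    (right = positions.length - 1 ∨ last_index < positions.getD right 0) →
    (let lr := aLoop positions last_index left right
     if positions.getD lr.1 0 > last_index then some (positions.getD lr.1 0)
     else if positions.getD lr.2 0 > last_index then some (positions.getD lr.2 0)
     else none) = firstGt positions last_index := by
  intro left right
  induction left, right using aLoop.induct positions last_index with
  | case1 left right hlt mid hmid ih =>
    intro hle hrlen hinv_l hinv_r
    rw [aLoop, if_pos hlt]
    rw [if_pos (show positions.getD ((left + right) / 2) 0 ≤ last_index from hmid)]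
    exact ih (by omega) hrlen
      (fun i hi => by
        rcases Nat.lt_or_ge i ((left + right) / 2) with h | h
        · exact le_trans (sorted_getD_mono positions hs (le_of_lt h) (by omega)) hmid
        · have : i = (left + right) / 2 := by omega
          simpa [this] using hmid)
      hinv_r
  | case2 left right hlt mid hmid ih =>
    intro hle hrlen hinv_l hinv_r
    rw [aLoop, if_pos hlt]
    rw [if_neg (show ¬ positions.getD ((left + right) / 2) 0 ≤ last_index from hmid)]
    exact ih (by omega) (by omega) hinv_l (Or.inr (by omega))
  | case3 left right hnlt =>
    intro hle hrlen hinv_l hinv_r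
    rw [aLoop, if_neg hnlt]
    by_cases hL : positions.getD left 0 > last_index
    · rw [if_pos hL]
      exact (firstGt_eq_some positions last_index left (by omega) hinv_l hL).symm
    · rw [if_neg hL]
      push_neg at hL
      by_cases hR : positions.getD right 0 > last_index
      · rw [if_pos hR]
        -- right = left + 1 here (right = left contradicts hL/hR)
        have hr_left : right = left + 1 := by
          rcases Nat.lt_or_ge left right with h | h
          · omega
          · exfalso; have : right = left := by omega
            rw [this] at hR; omega
        refine (firstGt_eq_some positions last_index right (by omega) ?_ hR).symm
        intro i hi
        exact le_trans (sorted_getD_mono positions hs (by omega) (by omega)) hL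
      · rw [if_neg hR]
        push_neg at hR
        rcases hinv_r with h | h
        · refine (firstGt_eq_none positions last_index ?_).symm
          intro i hi
          exact le_trans (sorted_getD_mono positions hs (by omega) (by omega)) hR
        · omega

-- ===== VERDICT (by name: the statement is the Claim_ definition above) =====
theorem find_char_after_index_spec : Claim_equal_find_char_after_index := by
  intro c last_index char_position _hdom hpre
  unfold Spec_find_char_after_index find_char_after_index find_char_after_index_alt
  set positions := (char_position.lookup c).getD [] with hpos
  by_cases hemp : positions = []
  · simp [hemp, firstGt]
  · have hlen : 0 < positions.length := List.length_pos_iff.mpr hemp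
    simp only [if_neg hemp]
    exact aLoop_correct positions last_index hpre 0 (positions.length - 1)
      (by omega) (by omega) (fun i hi => absurd hi (Nat.not_lt_zero i)) (Or.inl rfl)
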